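-- pv_equiv track=rewrite | github.com/edumabagraham/CodewarsProjects | prodFibonacci.py | productFib
-- ===== SOURCE A (Python) =====
-- def productFib(prod):
--     fibSequence = fib(prod)
--     arr = []
--     for i in range(1,len(fibSequence)):
--         for x in range(1,len(fibSequence)):
--          if i * x == prod:
--             arr.append(i)
--     return arr
--
-- def fib(n):
--     fibonacciSeries =[0,1]
--     if n > 2:
--         for i in range(2,n+1):
--                 nextNumber = fibonacciSeries[i-1] + fibonacciSeries[i-2]
--                 fibonacciSeries.append(nextNumber)
--     return fibonacciSeries
-- ===== SOURCE B (Python) =====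
-- def productFib(prod):
--     # One linear pass with a divisibility test instead of building a Fibonacci
--     # list and scanning all factor pairs quadratically.
--     return [d for d in range(1, prod + 1) if prod % d == 0]
-- ===== Notes on version B (the rewrite author's own statement) =====
-- stated objective: faster
-- what changed: Replaced the fib-list construction and the quadratic double scan over all factor pairs by a single linear pass over 1..prod with a modulo divisibility test.
-- intended difference: For prod == 2 A's fib list has length 2 so its quadratic scan never reaches the factor pair for 2 and returns [], while B returns the intended sorted divisor list [1, 2]. — e.g. on productFib(2): A returns [], B returns [1, 2]
import Mathlib
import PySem

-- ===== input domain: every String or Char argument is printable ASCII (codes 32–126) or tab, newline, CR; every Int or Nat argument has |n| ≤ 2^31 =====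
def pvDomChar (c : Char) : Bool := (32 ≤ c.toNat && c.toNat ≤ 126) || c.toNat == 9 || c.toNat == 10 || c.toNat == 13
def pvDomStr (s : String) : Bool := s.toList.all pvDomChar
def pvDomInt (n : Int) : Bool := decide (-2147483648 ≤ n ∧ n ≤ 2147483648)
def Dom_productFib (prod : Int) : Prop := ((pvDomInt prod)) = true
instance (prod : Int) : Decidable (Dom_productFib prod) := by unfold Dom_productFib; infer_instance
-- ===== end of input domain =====

-- B replaces A's fib-list construction and quadratic factor-pair scan by one
-- linear pass over 1..prod with a modulo divisibility test (faster, asymptotic).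

-- ===== PORT A =====
-- helper fib(n); the list indices i-1, i-2 are always in range in Python, so
-- pyGetD with default 0 is exact here (it is never the default that is read)
def pvFib (n : Int) : List Int :=
  let fibonacciSeries : List Int := [0, 1]
  if n > 2 then
    (PySem.List.pyRange 2 (n + 1) 1).foldl
      (fun l i =>
        let nextNumber := PySem.List.pyGetD l (i - 1) 0 + PySem.List.pyGetD l (i - 2) 0
        l ++ [nextNumber])
      fibonacciSeries
  else fibonacciSeries

def productFib (prod : Int) : List Int :=
  let fibSequence := pvFib prod
  let arr : List Int := []
  (PySem.List.pyRange 1 (PySem.List.len fibSequence) 1).foldl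
    (fun arr i =>
      (PySem.List.pyRange 1 (PySem.List.len fibSequence) 1).foldl
        (fun arr x => if i * x = prod then arr ++ [i] else arr)
        arr)
    arr

-- ===== PORT B =====
def productFib_alt (prod : Int) : List Int :=
  (PySem.List.pyRange 1 (prod + 1) 1).filter (fun d => PySem.Int.mod prod d = 0)

-- ===== PRECONDITION & SPEC =====
-- At prod = 2 A's fib list has length 2, so its quadratic scan never reaches the factor pair for 2 and returns [];
-- B returns the intended sorted divisor list [1, 2].
def D_productFib (prod : Int) : Prop := prod = 2
instance (prod : Int) : Decidable (D_productFib prod) := by unfold D_productFib; infer_instance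
def Spec_productFib (prod : Int) (out : List Int) : Prop := ¬ D_productFib prod → out = productFib_alt prod
instance (prod : Int) (out : List Int) : Decidable (Spec_productFib prod out) := by unfold Spec_productFib; infer_instance
def pvDiffWitness_productFib : Int := 2
def pvDiffWitnessOut_productFib : (List Int) × (List Int) := ([], [1, 2])

-- ===== CLAIM (what is proved, stated in full; the proofs are below) =====
def Claim_unchanged_productFib : Prop := ∀ (prod : Int), Dom_productFib prod → Spec_productFib prod (productFib prod)
def Claim_changed_productFib : Prop := Dom_productFib (pvDiffWitness_productFib) ∧ D_productFib (pvDiffWitness_productFib) ∧ productFib (pvDiffWitness_productFib) = pvDiffWitnessOut_productFib.1 ∧ productFib_alt (pvDiffWitness_productFib) = pvDiffWitnessOut_productFib.2 ∧ pvDiffWitnessOut_productFib.1 ≠ pvDiffWitnessOut_productFib.2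
def Claim_exact_productFib : Prop := ∀ (prod : Int), Dom_productFib prod → D_productFib prod → productFib prod ≠ productFib_alt prod

-- ===== LEMMAS AND PROOFS =====

-- appending one element per iteration: the fold only changes the length by the count
theorem pvFoldAppendLen (xs : List Int) (f : List Int → Int → Int) :
    ∀ (l : List Int),
      (xs.foldl (fun l i => l ++ [f l i]) l).length = l.length + xs.length := by
  induction xs with
  | nil => intro l; simp
  | cons x xs ih =>
    intro l
    simp [List.foldl_cons, ih]
    omega

theorem pvFibLen (prod : Int) (h : prod > 2) :
    ((pvFib prod).length : Int) = prod + 1 := by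
  unfold pvFib
  simp only [if_pos h]
  rw [pvFoldAppendLen (PySem.List.pyRange 2 (prod + 1) 1)
      (fun l i => PySem.List.pyGetD l (i - 1) 0 + PySem.List.pyGetD l (i - 2) 0)]
  rw [PySem.List.length_pyRange_one]
  simp
  omega

theorem pvFlatMapFilter (p : Int → Prop) [DecidablePred p] (l : List Int) :
    l.flatMap (fun i => if p i then [i] else []) = l.filter (fun i => decide (p i)) := by
  induction l with
  | nil => simp
  | cons x xs ih =>
    by_cases hx : p x <;> simp [hx, ih]

theorem pvFilterSingleton (a b q : Int) (hab : a ≤ q) (hq : q < b) :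
    (PySem.List.pyRange a b 1).filter (fun x => decide (x = q)) = [q] := by
  have hmem : q ∈ PySem.List.pyRange a b 1 := by
    rw [PySem.List.mem_pyRange_one]; exact ⟨hab, hq⟩
  have hnd : (PySem.List.pyRange a b 1).Nodup := PySem.List.nodup_pyRange_one a b
  have := List.count_eq_one_of_mem hnd hmem
  have hbeq : (PySem.List.pyRange a b 1).filter (fun x => x == q) =
      List.replicate ((PySem.List.pyRange a b 1).count q) q := List.filter_beq q
  calc (PySem.List.pyRange a b 1).filter (fun x => decide (x = q))
      = (PySem.List.pyRange a b 1).filter (fun x => x == q) := by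
        apply List.filter_congr; intro x _
        rw [← Bool.coe_iff_coe]; simp
    _ = [q] := by rw [hbeq, this]; simp

-- the inner scan of A finds i's cofactor exactly when i divides prod
theorem pvInnerFilter (prod i : Int) (hp : prod > 0) (hi1 : 1 ≤ i) (_hi2 : i ≤ prod) :
    (PySem.List.pyRange 1 (prod + 1) 1).filter (fun x => decide (i * x = prod)) =
      if i ∣ prod then [prod / i] else [] := by
  by_cases hd : i ∣ prod
  · obtain ⟨q, hq⟩ := hd
    have hipos : 0 < i := by omega
    have hq' : prod / i = q := by rw [hq]; exact Int.mul_ediv_cancel_left q (by omega)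
    have hqpos : 1 ≤ q := by nlinarith
    have hqle : q ≤ prod := by nlinarith
    rw [if_pos ⟨q, hq⟩, hq']
    calc (PySem.List.pyRange 1 (prod + 1) 1).filter (fun x => decide (i * x = prod))
        = (PySem.List.pyRange 1 (prod + 1) 1).filter (fun x => decide (x = q)) := by
          apply List.filter_congr; intro x _
          simp only [decide_eq_decide]
          constructor
          · intro hx
            have : i * x = i * q := by omega
            exact mul_left_cancel₀ (by omega) this
          · intro hx; rw [hx, ← hq]
      _ = [q] := pvFilterSingleton 1 (prod + 1) q hqpos (by omega)
  · rw [if_neg hd]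
    apply List.filter_eq_nil_iff.mpr
    intro x _
    simp only [decide_eq_true_eq]
    intro hx
    exact hd ⟨x, hx.symm⟩

theorem pvMain (prod : Int) (hp : prod > 2) : productFib prod = productFib_alt prod := by
  unfold productFib productFib_alt
  have hlen : PySem.List.len (pvFib prod) = prod + 1 := by
    rw [PySem.List.len_eq]; exact pvFibLen prod hp
  simp only [hlen]
  have hinner : ∀ (acc : List Int) (i : Int),
      (PySem.List.pyRange 1 (prod + 1) 1).foldl
          (fun arr x => if i * x = prod then arr ++ [i] else arr) acc =
        acc ++ ((PySem.List.pyRange 1 (prod + 1) 1).filter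
          (fun x => decide (i * x = prod))).map (fun _ => i) := by
    intro acc i
    exact PySem.List.foldl_append_ite (fun x => i * x = prod) (fun _ => i) _ _
  simp only [hinner]
  rw [PySem.List.foldl_append_eq_flatMap]
  have hflat : (PySem.List.pyRange 1 (prod + 1) 1).flatMap
      (fun i => ((PySem.List.pyRange 1 (prod + 1) 1).filter
        (fun x => decide (i * x = prod))).map (fun _ => i)) =
      (PySem.List.pyRange 1 (prod + 1) 1).flatMap
        (fun i => if i ∣ prod then [i] else []) := by
    apply List.flatMap_congr
    intro i hi
    rw [PySem.List.mem_pyRange_one] at hi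
    rw [pvInnerFilter prod i (by omega) hi.1 (by omega)]
    by_cases hd : i ∣ prod <;> simp [hd]
  rw [hflat, pvFlatMapFilter (fun i => i ∣ prod), List.nil_append]
  apply List.filter_congr
  intro d _
  simp only [decide_eq_decide]
  exact (PySem.Int.mod_eq_zero_iff_dvd prod d).symm

-- ===== VERDICT (by name: the statement is the Claim_ definition above) =====
theorem productFib_spec : Claim_unchanged_productFib := by
  intro prod _ hD
  have hne2 : prod ≠ 2 := by simpa [D_productFib] using hD
  by_cases h2 : prod > 2
  · exact pvMain prod h2
  · by_cases h1 : prod = 1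
    · subst h1; decide
    · have hle : prod ≤ 0 := by omega
      unfold productFib productFib_alt pvFib
      rw [if_neg h2]
      simp only [PySem.List.len_eq, List.length_cons, List.length_nil]
      rw [PySem.List.pyRange_one_eq_nil (a := 1) (b := prod + 1) (by omega)]
      rw [show PySem.List.pyRange 1 (((0 + 1 + 1 : Nat) : Int)) 1 = [1] from by decide]
      simp [List.foldl]
      omega

theorem productFib_changed : Claim_changed_productFib := by
  unfold Claim_changed_productFib; decide

theorem productFib_tight : Claim_exact_productFib := by
  intro prod _ hD
  subst hD
  decide
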